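-- pv_equiv track=rewrite | github.com/eawlot3000/cp | luogu/b2126/solve.py | find_first_repeating_char
-- ===== SOURCE A (Python) =====
-- def find_first_repeating_char(k, s):
--   count = 1
--   for i in range(1, len(s)):
--     if s[i] == s[i - 1]:
--       count += 1
--       if count >= k:
--         return s[i]
--     else:
--       count = 1
--   return "No"
-- ===== SOURCE B (Python) =====
-- def find_first_repeating_char(k, s):
--     # runs-first: scan each maximal run of equal chars; a run qualifies
--     # iff its length >= max(k, 2), since A's check only fires on a repeat.
--     need = k if k > 2 else 2
--     i = 0
--     n = len(s)
--     while i < n: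
--         j = i + 1
--         while j < n and s[j] == s[i]:
--             j += 1
--         if j - i >= need:
--             return s[i]
--         i = j
--     return "No"
-- ===== Notes on version B (the rewrite author's own statement) =====
-- stated objective: alternative
-- what changed: Replaces the running counter-with-reset over adjacent pairs by a runs-first decomposition: skip over each maximal run of equal characters and return its character as soon as the run length reaches max(k,2).
import Mathlib
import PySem

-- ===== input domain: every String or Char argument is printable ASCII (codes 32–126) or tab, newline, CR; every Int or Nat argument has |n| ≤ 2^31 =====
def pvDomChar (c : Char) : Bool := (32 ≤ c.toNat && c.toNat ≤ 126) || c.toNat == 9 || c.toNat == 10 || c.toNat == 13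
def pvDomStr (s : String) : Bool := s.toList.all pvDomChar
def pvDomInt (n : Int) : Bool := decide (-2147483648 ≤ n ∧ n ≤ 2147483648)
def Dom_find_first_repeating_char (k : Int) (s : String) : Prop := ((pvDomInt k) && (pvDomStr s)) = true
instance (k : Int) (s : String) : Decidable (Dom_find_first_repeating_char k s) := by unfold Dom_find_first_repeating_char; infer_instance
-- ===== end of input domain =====

-- ===== PORT A =====
-- counter-with-reset loop over i in range(1, len s): recursion over the
-- remaining chars carrying (prev, count), the same state as A's loop.
def pvLoopA (k : Int) (cs : List Char) (prev : Char) (count : Int) : String :=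
  match cs with
  | [] => "No"
  | c :: rest =>
    if c = prev then
      if count + 1 ≥ k then String.ofList [c]
      else pvLoopA k rest c (count + 1)
    else pvLoopA k rest c 1

def find_first_repeating_char (k : Int) (s : String) : String :=
  match s.toList with
  | [] => "No"
  | c :: rest => pvLoopA k rest c 1

-- ===== PORT B =====
-- runs-first: the inner `while s[j] == s[i]` scan of Source B is the
-- takeWhile/dropWhile split of the rest on equality with the run head.
def pvLoopB (need : Int) (cs : List Char) : String :=
  match cs with
  | [] => "No"
  | c :: rest =>
    if (1 + (rest.takeWhile (fun d => d = c)).length : Int) ≥ need then String.ofList [c]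
    else pvLoopB need (rest.dropWhile (fun d => d = c))
termination_by cs.length
decreasing_by
  have := List.length_dropWhile_le (p := fun d => d = c) (l := rest)
  simpa using Nat.lt_succ_of_le this

def find_first_repeating_char_alt (k : Int) (s : String) : String :=
  pvLoopB (if k > 2 then k else 2) s.toList

-- ===== PRECONDITION & SPEC =====
def Spec_find_first_repeating_char (k : Int) (s : String) (out : String) : Prop := out = find_first_repeating_char_alt k s
instance (k : Int) (s : String) (out : String) : Decidable (Spec_find_first_repeating_char k s out) := by unfold Spec_find_first_repeating_char; infer_instance

-- ===== CLAIM (what is proved, stated in full; the proofs are below) =====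
def Claim_equal_find_first_repeating_char : Prop := ∀ (k : Int) (s : String), Dom_find_first_repeating_char k s → Spec_find_first_repeating_char k s (find_first_repeating_char k s)

-- ===== LEMMAS AND PROOFS =====
-- A's threshold k behaves like max(k,2): the check `count+1 ≥ k` only runs with count ≥ 1.
theorem pvLoopA_need (k : Int) (cs : List Char) (prev : Char) (count : Int)
    (h1 : 1 ≤ count) :
    pvLoopA k cs prev count = pvLoopA (if k > 2 then k else 2) cs prev count := by
  induction cs generalizing prev count with
  | nil => simp [pvLoopA]
  | cons c rest ih =>
    by_cases h2k : k > 2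
    · simp [h2k]
    · simp only [pvLoopA, if_neg h2k]
      by_cases hc : c = prev
      · have ht : count + 1 ≥ k := by omega
        have ht2 : count + 1 ≥ (2 : Int) := by omega
        simp [hc, ht, ht2]
      · have := ih c 1 (by omega)
        simp only [if_neg h2k] at this
        simp [hc, this]

-- Mid-run characterisation: A's loop at prev-char c with count m (below the
-- threshold) returns c iff the rest of c's run brings the count to `need`,
-- and otherwise continues as B does after the run.
theorem pvLoopA_run (need : Int) (cs : List Char) (c : Char) (m : Int)
    (h1 : 1 ≤ m) (h2 : m < need) (hneed : 2 ≤ need) :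
    pvLoopA need cs c m =
      (if (m + (cs.takeWhile (fun d => d = c)).length : Int) ≥ need then String.ofList [c]
       else pvLoopB need (cs.dropWhile (fun d => d = c))) := by
  induction cs generalizing c m with
  | nil => simp only [pvLoopA, List.takeWhile_nil, List.dropWhile_nil, List.length_nil]
           rw [if_neg (by push_cast; omega)]; simp [pvLoopB]
  | cons d rest ih =>
    by_cases hd : d = c
    · subst hd
      have hlen : (0:Int) ≤ ((rest.takeWhile (fun e => e = d)).length : Int) :=
        Int.natCast_nonneg _
      simp only [pvLoopA, if_pos rfl, List.takeWhile_cons, List.dropWhile_cons,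
        decide_true, if_true, List.length_cons]
      by_cases hge : m + 1 ≥ need
      · rw [if_pos hge, if_pos (by push_cast; omega)]
      · rw [if_neg hge, ih d (m + 1) (by omega) (by omega)]
        simp only [Nat.cast_add, Nat.cast_one]
        split_ifs with hA hB
        · rfl
        · exact (hB (by omega)).elim
        · exact (hA (by omega)).elim
        · rfl
    · have e1 : (d :: rest).takeWhile (fun e => decide (e = c)) = [] := by
        simp [List.takeWhile_cons, hd]
      have e2 : (d :: rest).dropWhile (fun e => decide (e = c)) = d :: rest := by
        simp [List.dropWhile_cons, hd]
      rw [e1, e2, if_neg (by simp; omega)]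
      simp only [pvLoopA, if_neg hd]
      rw [ih d 1 (by omega) (by omega)]
      conv_rhs => rw [pvLoopB]

-- ===== VERDICT (by name: the statement is the Claim_ definition above) =====
theorem find_first_repeating_char_spec : Claim_equal_find_first_repeating_char := by
  intro k s _
  unfold Spec_find_first_repeating_char find_first_repeating_char find_first_repeating_char_alt
  set need : Int := if k > 2 then k else 2 with hneed
  have h2 : 2 ≤ need := by by_cases h : k > 2 <;> simp [hneed, h] <;> omega
  cases hs : s.toList with
  | nil => simp [pvLoopB]
  | cons c rest =>
    show pvLoopA k rest c 1 = pvLoopB need (c :: rest)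
    rw [pvLoopA_need k rest c 1 (by omega), ← hneed,
        pvLoopA_run need rest c 1 (by omega) (by omega) h2]
    conv_rhs => rw [pvLoopB]
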